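-- pv_equiv track=rewrite | github.com/lawconsul/Python_algorithms | task_07_3.py | get_mediana
-- ===== SOURCE A (Python) =====
-- def get_mediana(arr):
--     for i in range(0, len(arr)):  #цикл поиска медианы
--         n, m = 0, 0     #счетчики бОльших и меньших значений
--         for j in range(0, len(arr)):
--             if arr[j] >= arr[i]:
--                 n += 1
--             if arr[j] <= arr[i]:
--                 m += 1
--         if n == m:
--             return arr[i]
-- ===== SOURCE B (Python) =====
-- def get_mediana(arr):
--     # sort once, then compute (#smaller, #larger) per distinct value by scanning runs
--     s = sorted(arr)
--     stats = {}
--     k = 0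
--     rest = s
--     while rest:
--         x = rest[0]
--         run = 1
--         while run < len(rest) and rest[run] == x:
--             run += 1
--         stats[x] = (k, len(rest) - run)
--         k += run
--         rest = rest[run:]
--     for x in arr:
--         less, greater = stats[x]
--         if less == greater:
--             return x
--     return None
-- ===== Notes on version B (the rewrite author's own statement) =====
-- stated objective: faster
-- what changed: Replaces the quadratic all-pairs counting (for each element rescan the whole list) by sorting once and computing (#smaller, #larger) per distinct value from run positions in the sorted list, then a single pass picks the first element with equal counts.
import Mathlib
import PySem

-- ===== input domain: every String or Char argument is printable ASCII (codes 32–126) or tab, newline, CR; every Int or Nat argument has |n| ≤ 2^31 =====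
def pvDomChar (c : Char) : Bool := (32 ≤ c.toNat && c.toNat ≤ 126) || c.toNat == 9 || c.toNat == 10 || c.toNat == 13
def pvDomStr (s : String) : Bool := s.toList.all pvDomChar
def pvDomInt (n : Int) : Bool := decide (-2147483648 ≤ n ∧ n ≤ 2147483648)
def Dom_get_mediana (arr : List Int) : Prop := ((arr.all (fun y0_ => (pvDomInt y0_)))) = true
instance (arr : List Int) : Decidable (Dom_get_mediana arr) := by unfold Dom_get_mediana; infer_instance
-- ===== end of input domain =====

-- B sorts once and derives (#smaller, #larger) per distinct value from run positions
-- in the sorted list, replacing A's quadratic rescans (objective: faster).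


-- ===== PORT A =====
-- outer 'for i' = recursion over the elements arr[i]; inner 'for j' = one fold over arr
-- carrying the pair of counters (n, m)
def pvAGo (arr : List Int) : List Int → Option Int
  | [] => none
  | x :: rest =>
    let nm := arr.foldl
      (fun (p : Int × Int) y =>
        ((if y ≥ x then p.1 + 1 else p.1), (if y ≤ x then p.2 + 1 else p.2))) (0, 0)
    if nm.1 = nm.2 then some x else pvAGo arr rest

def get_mediana (arr : List Int) : Option Int := pvAGo arr arr

-- ===== PORT B =====
-- the outer 'while rest' loop: the inner while computes run = length of the leading
-- run of copies of rest[0]; stats[x] = (k, len(rest) - run); then k += run, rest = rest[run:]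
def pvBuild (k : Int) (stats : PySem.Dict Int (Int × Int)) :
    List Int → PySem.Dict Int (Int × Int)
  | [] => stats
  | x :: xs =>
    pvBuild (k + ((((x :: xs).takeWhile (fun y => y == x)).length : Nat) : Int))
      (stats.insert x (k, ((x :: xs).length : Int) - ((((x :: xs).takeWhile (fun y => y == x)).length : Nat) : Int)))
      ((x :: xs).drop ((x :: xs).takeWhile (fun y => y == x)).length)
termination_by l => l.length
decreasing_by
  have h1 : 1 ≤ ((x :: xs).takeWhile (fun y => y == x)).length := by simp
  simp only [List.length_drop, List.length_cons]
  omega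

-- the 'for x in arr' pass picking the first element with less == greater
def pvPick (stats : PySem.Dict Int (Int × Int)) : List Int → Option Int
  | [] => none
  | x :: rest =>
    match stats.get? x with
    | some (l, g) => if l = g then some x else pvPick stats rest
    | none => none

def get_mediana_alt (arr : List Int) : Option Int :=
  let s := PySem.List.sorted arr (fun y => y) false
  let stats := pvBuild 0 PySem.Dict.empty s
  pvPick stats arr

-- ===== PRECONDITION & SPEC =====
def Spec_get_mediana (arr : List Int) (out : Option Int) : Prop := out = get_mediana_alt arr
instance (arr : List Int) (out : Option Int) : Decidable (Spec_get_mediana arr out) := by unfold Spec_get_mediana; infer_instance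

-- ===== CLAIM (what is proved, stated in full; the proofs are below) =====
def Claim_equal_get_mediana : Prop := ∀ (arr : List Int), Dom_get_mediana arr → Spec_get_mediana arr (get_mediana arr)

-- ===== LEMMAS AND PROOFS =====

-- A's inner loop computes (#{y | y ≥ x}, #{y | y ≤ x})
lemma pvA_fold (x : Int) (l : List Int) (a b : Int) :
    l.foldl (fun (p : Int × Int) y =>
        ((if y ≥ x then p.1 + 1 else p.1), (if y ≤ x then p.2 + 1 else p.2))) (a, b)
      = (a + (l.countP (fun y => decide (x ≤ y)) : Int),
         b + (l.countP (fun y => decide (y ≤ x)) : Int)) := by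
  induction l generalizing a b with
  | nil => simp
  | cons z t ih =>
    simp only [List.foldl_cons, List.countP_cons]
    rw [ih]
    simp only [Prod.mk.injEq, ge_iff_le]
    refine ⟨?_, ?_⟩ <;> split_ifs <;> simp_all <;> omega

lemma pv_count_split (x : Int) (l : List Int) :
    l.countP (fun y => decide (x ≤ y)) + l.countP (fun y => decide (y < x)) = l.length ∧
    l.countP (fun y => decide (y ≤ x)) + l.countP (fun y => decide (x < y)) = l.length := by
  induction l with
  | nil => simp
  | cons z t ih =>
    obtain ⟨ih1, ih2⟩ := ih
    simp only [List.countP_cons, List.length_cons]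
    refine ⟨?_, ?_⟩ <;>
      by_cases h1 : x ≤ z <;> by_cases h2 : z ≤ x <;>
      by_cases h3 : z < x <;> by_cases h4 : x < z <;>
        simp [h1, h2, h3, h4] <;> omega

-- pvBuild only touches keys that are members of the list it scans
lemma pvBuild_get?_not_mem : ∀ (n : Nat) (rest : List Int), rest.length ≤ n →
    ∀ (k : Int) (stats : PySem.Dict Int (Int × Int)) (v : Int), v ∉ rest →
    (pvBuild k stats rest).get? v = stats.get? v := by
  intro n
  induction n with
  | zero =>
    intro rest hlen k stats v _
    cases rest with
    | nil => rw [pvBuild]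
    | cons x xs => simp at hlen
  | succ n ih =>
    intro rest hlen k stats v hv
    cases rest with
    | nil => rw [pvBuild]
    | cons x xs =>
      rw [pvBuild]
      have hvx : v ≠ x := by intro h; exact hv (h ▸ List.mem_cons_self)
      have h1 : 1 ≤ ((x :: xs).takeWhile (fun y => y == x)).length := by simp
      have hlt : ((x :: xs).drop ((x :: xs).takeWhile (fun y => y == x)).length).length ≤ n := by
        simp only [List.length_drop, List.length_cons]
        simp only [List.length_cons] at hlen
        omega
      have hv' : v ∉ (x :: xs).drop ((x :: xs).takeWhile (fun y => y == x)).length :=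
        fun h => hv (List.drop_subset _ _ h)
      rw [ih _ hlt _ _ _ hv', PySem.Dict.get?_insert_of_ne _ _ hvx]

-- the first element surviving dropWhile fails the predicate
lemma pv_dropWhile_head_false {p : Int → Bool} : ∀ {l : List Int} {h : Int} {t : List Int},
    l.dropWhile p = h :: t → p h = false := by
  intro l
  induction l with
  | nil => intro h t hc; simp at hc
  | cons a l ih =>
    intro h t hc
    rw [List.dropWhile_cons] at hc
    by_cases hp : p a
    · rw [if_pos hp] at hc; exact ih hc
    · rw [if_neg hp] at hc
      cases hc
      simpa using hp

-- the dict built from a sorted list maps each member v to (k + #{y < v}, #{y > v})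
lemma pvBuild_get?_mem : ∀ (n : Nat) (rest : List Int), rest.length ≤ n →
    rest.Pairwise (· ≤ ·) →
    ∀ (k : Int) (stats : PySem.Dict Int (Int × Int)) (v : Int), v ∈ rest →
    (pvBuild k stats rest).get? v
      = some (k + (rest.countP (fun y => decide (y < v)) : Int),
              (rest.countP (fun y => decide (v < y)) : Int)) := by
  intro n
  induction n with
  | zero =>
    intro rest hlen _ k stats v hv
    cases rest with
    | nil => exact absurd hv List.not_mem_nil
    | cons x xs => simp at hlen
  | succ n ih =>
    intro rest hlen hsort k stats v hv
    cases rest with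
    | nil => exact absurd hv List.not_mem_nil
    | cons x xs =>
      have hall : ∀ y ∈ xs, x ≤ y := (List.pairwise_cons.mp hsort).1
      set tw := (x :: xs).takeWhile (fun y => y == x) with htw
      set dw := (x :: xs).dropWhile (fun y => y == x) with hdw
      have hsplit : tw ++ dw = x :: xs := List.takeWhile_append_dropWhile
      have hdrop : (x :: xs).drop tw.length = dw := by
        conv_lhs => rw [← hsplit]
        exact List.drop_left
      have htw_eq : ∀ y ∈ tw, y = x := by
        intro y hy
        have := List.mem_takeWhile_imp hy
        simpa using this
      have hdw_gt : ∀ z ∈ dw, x < z := by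
        cases hdwc : dw with
        | nil => simp
        | cons h t =>
          have hhead : (h == x) = false := pv_dropWhile_head_false (p := fun y => y == x) (l := x :: xs) (by rw [← hdw]; exact hdwc)
          have hhx : x < h := by
            have hmem : h ∈ x :: xs := by rw [← hsplit, hdwc]; simp
            have hle : x ≤ h := by
              rcases List.mem_cons.mp hmem with h' | h'
              · omega
              · exact hall _ h'
            have : h ≠ x := by simpa using hhead
            omega
          have hdws : dw.Pairwise (· ≤ ·) := hsort.sublist (List.dropWhile_sublist _)
          rw [hdwc] at hdws
          intro z hz
          rcases List.mem_cons.mp hz with h' | h'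
          · omega
          · have := (List.pairwise_cons.mp hdws).1 _ h'
            omega
      have hlen_split : tw.length + dw.length = xs.length + 1 := by
        have := congrArg List.length hsplit
        simpa using this
      have htw1 : 1 ≤ tw.length := by rw [htw]; simp
      have hcount_lt_x : (x :: xs).countP (fun y => decide (y < x)) = 0 := by
        rw [List.countP_eq_zero]
        intro z hz
        rcases List.mem_cons.mp hz with h' | h'
        · simp [h']
        · have := hall _ h'; simp; omega
      have hcount_gt_x : (x :: xs).countP (fun y => decide (x < y)) = dw.length := by
        rw [← hsplit, List.countP_append]
        have h1 : tw.countP (fun y => decide (x < y)) = 0 := by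
          rw [List.countP_eq_zero]; intro z hz; have := htw_eq _ hz; simp [this]
        have h2 : dw.countP (fun y => decide (x < y)) = dw.length := by
          rw [List.countP_eq_length]; intro z hz; have := hdw_gt _ hz; simpa
        omega
      rw [pvBuild]
      rw [← htw, hdrop]
      have hlt : dw.length ≤ n := by
        simp only [List.length_cons] at hlen
        omega
      by_cases hvx : v = x
      · subst hvx
        have hnotin : v ∉ dw := by
          intro h
          have := hdw_gt _ h
          omega
        rw [pvBuild_get?_not_mem n dw hlt _ _ _ hnotin, PySem.Dict.get?_insert_self]
        rw [hcount_lt_x, hcount_gt_x]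
        congr 2
        · omega
        · simp only [List.length_cons]; push_cast; omega
      · have hvdw : v ∈ dw := by
          have hmem : v ∈ tw ++ dw := by rw [hsplit]; exact hv
          rcases List.mem_append.mp hmem with h' | h'
          · exact absurd (htw_eq _ h') hvx
          · exact h'
        have hxv : x < v := hdw_gt _ hvdw
        have hdws : dw.Pairwise (· ≤ ·) := hsort.sublist (List.dropWhile_sublist _)
        rw [ih dw hlt hdws _ _ v hvdw]
        have hc1 : (x :: xs).countP (fun y => decide (y < v))
            = tw.length + dw.countP (fun y => decide (y < v)) := by
          rw [← hsplit, List.countP_append]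
          have : tw.countP (fun y => decide (y < v)) = tw.length := by
            rw [List.countP_eq_length]; intro z hz
            have := htw_eq _ hz; subst this; simpa
          omega
        have hc2 : (x :: xs).countP (fun y => decide (v < y))
            = dw.countP (fun y => decide (v < y)) := by
          rw [← hsplit, List.countP_append]
          have : tw.countP (fun y => decide (v < y)) = 0 := by
            rw [List.countP_eq_zero]; intro z hz
            have := htw_eq _ hz; subst this; simp; omega
          omega
        rw [hc1, hc2]
        congr 2
        push_cast; omega

-- both scans over the same element list take the same branch at every step
lemma pvAGo_eq_pvPick (arr : List Int) :
    ∀ l : List Int, (∀ x ∈ l, x ∈ arr) →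
    pvAGo arr l = pvPick (pvBuild 0 PySem.Dict.empty (PySem.List.sorted arr (fun y => y) false)) l := by
  intro l
  induction l with
  | nil => intro _; rfl
  | cons x rest ih =>
    intro hsub
    have hx : x ∈ arr := hsub x List.mem_cons_self
    set s := PySem.List.sorted arr (fun y => y) false with hs
    have hxs : x ∈ s := by rw [hs, PySem.List.mem_sorted]; exact hx
    have hsorted : s.Pairwise (· ≤ ·) := by
      have := PySem.List.sorted_pairwise (xs := arr) (key := fun y => y)
      simpa using this
    have hget := pvBuild_get?_mem s.length s le_rfl hsorted 0 PySem.Dict.empty x hxs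
    have hperm : s.Perm arr := PySem.List.sorted_perm arr (fun y => y) false
    have hcl : s.countP (fun y => decide (y < x)) = arr.countP (fun y => decide (y < x)) :=
      hperm.countP_eq _
    have hcg : s.countP (fun y => decide (x < y)) = arr.countP (fun y => decide (x < y)) :=
      hperm.countP_eq _
    rw [pvAGo, pvPick, hget]
    simp only [pvA_fold, zero_add]
    have hsp := pv_count_split x arr
    have hcond : ((arr.countP (fun y => decide (x ≤ y)) : Int)
          = (arr.countP (fun y => decide (y ≤ x)) : Int))
        ↔ (((s.countP (fun y => decide (y < x)) : Nat) : Int)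
          = ((s.countP (fun y => decide (x < y)) : Nat) : Int)) := by
      rw [hcl, hcg]
      constructor <;> intro h
      · push_cast at h ⊢; omega
      · push_cast at h ⊢; omega
    by_cases hb : ((arr.countP (fun y => decide (x ≤ y)) : Int)
        = (arr.countP (fun y => decide (y ≤ x)) : Int))
    · rw [if_pos hb, if_pos (hcond.mp hb)]
    · rw [if_neg hb, if_neg (fun h => hb (hcond.mpr h))]
      exact ih (fun y hy => hsub y (List.mem_cons_of_mem _ hy))

-- ===== VERDICT (by name: the statement is the Claim_ definition above) =====
theorem get_mediana_spec : Claim_equal_get_mediana := by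
  intro arr _
  unfold Spec_get_mediana get_mediana get_mediana_alt
  exact pvAGo_eq_pvPick arr arr (fun _ h => h)
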